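-- pv_equiv track=rewrite | github.com/Kevinmthau/kevins-outfit-finder | generate_static_site.py | sort_items_by_category
-- ===== SOURCE A (Python) =====
-- def categorize_clothing_item(item_name):
--     """Categorize clothing items into bottoms, tops, and shoes"""
--     item_lower = item_name.lower()
--
--     # Bottoms (pants, trousers, shorts, jeans)
--     if any(keyword in item_lower for keyword in ['trouser', 'short', 'jean', '5-pocket', 'khaki', 'pant']):
--         return 'bottoms'
--
--     # Shoes (loafers, espadrilles, sandals)
--     elif any(keyword in item_lower for keyword in ['loafer', 'espadrille', 'sandal', 'shoe']):
--         return 'shoes'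
--
--     # Everything else is considered tops (shirts, polos, blazers, sweaters, etc.)
--     else:
--         return 'tops'
--
-- def sort_items_by_category(clothing_index):
--     """Sort items by category: bottoms, tops, then shoes"""
--     categorized_items = {'bottoms': [], 'tops': [], 'shoes': []}
--
--     # Categorize all items
--     for item, pages in clothing_index.items():
--         category = categorize_clothing_item(item)
--         categorized_items[category].append((item, pages))
--
--     # Sort each category by frequency (most common first)
--     for category in categorized_items:
--         categorized_items[category].sort(key=lambda x: len(x[1]), reverse=True)
--
--     # Combine in order: bottoms, tops, shoes
--     sorted_items = (categorized_items['bottoms'] +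
--                    categorized_items['tops'] +
--                    categorized_items['shoes'])
--
--     return sorted_items, categorized_items
-- ===== SOURCE B (Python) =====
-- def categorize_clothing_item(item_name):
--     """Categorize clothing items into bottoms, tops, and shoes"""
--     item_lower = item_name.lower()
--     if any(keyword in item_lower for keyword in ['trouser', 'short', 'jean', '5-pocket', 'khaki', 'pant']):
--         return 'bottoms'
--     elif any(keyword in item_lower for keyword in ['loafer', 'espadrille', 'sandal', 'shoe']):
--         return 'shoes'
--     else:
--         return 'tops'
--
-- def sort_items_by_category(clothing_index):
--     """Sort items by category (bottoms, tops, shoes) with one composite-key stable sort, then group."""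
--     rank = {'bottoms': 0, 'tops': 1, 'shoes': 2}
--     sorted_items = sorted(
--         clothing_index.items(),
--         key=lambda kv: (rank[categorize_clothing_item(kv[0])], -len(kv[1])))
--     categorized_items = {
--         cat: [kv for kv in sorted_items if categorize_clothing_item(kv[0]) == cat]
--         for cat in ('bottoms', 'tops', 'shoes')}
--     return sorted_items, categorized_items
-- ===== Notes on version B (the rewrite author's own statement) =====
-- stated objective: alternative
-- what changed: Replaces the bucket-then-sort-each-of-three-categories-then-concatenate pipeline with one stable sort of all items under a composite key (category rank, -frequency), building the per-category dict afterwards by filtering the globally sorted list.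
import Mathlib
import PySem

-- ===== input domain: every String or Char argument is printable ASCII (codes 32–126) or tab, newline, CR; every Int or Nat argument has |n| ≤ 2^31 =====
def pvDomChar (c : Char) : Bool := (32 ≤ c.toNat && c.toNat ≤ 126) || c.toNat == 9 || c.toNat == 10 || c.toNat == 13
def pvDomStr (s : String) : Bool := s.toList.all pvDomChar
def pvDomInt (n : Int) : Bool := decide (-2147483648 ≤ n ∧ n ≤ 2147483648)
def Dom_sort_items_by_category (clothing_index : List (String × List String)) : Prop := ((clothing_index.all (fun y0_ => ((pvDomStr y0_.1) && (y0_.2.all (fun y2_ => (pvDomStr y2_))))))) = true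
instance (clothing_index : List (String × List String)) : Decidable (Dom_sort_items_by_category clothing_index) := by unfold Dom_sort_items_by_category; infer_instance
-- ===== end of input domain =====

-- B replaces three per-category reverse sorts + concatenation by ONE stable composite-key
-- ((category rank, -frequency)) sort followed by a filtering pass; alternative decomposition, same cost.


-- ===== PORT A =====
-- shared same-module helper (used by both Pythons verbatim)
def categorize_clothing_item (item_name : String) : String :=
  let item_lower := PySem.Str.lower item_name
  if (["trouser", "short", "jean", "5-pocket", "khaki", "pant"].any fun kw => PySem.Str.isIn kw item_lower) then
    "bottoms"
  else if (["loafer", "espadrille", "sandal", "shoe"].any fun kw => PySem.Str.isIn kw item_lower) then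
    "shoes"
  else
    "tops"

-- the fixed-key dict {'bottoms': …, 'tops': …, 'shoes': …} is carried as a triple (bottoms, tops, shoes)
def sort_items_by_category (clothing_index : List (String × List String)) : (List (String × List String)) × (List (String × List (String × List String))) :=
  let cats := clothing_index.foldl
    (fun (acc : List (String × List String) × List (String × List String) × List (String × List String)) kv =>
      let category := categorize_clothing_item kv.1
      if category == "bottoms" then (acc.1 ++ [kv], acc.2.1, acc.2.2)
      else if category == "tops" then (acc.1, acc.2.1 ++ [kv], acc.2.2)
      else (acc.1, acc.2.1, acc.2.2 ++ [kv]))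
    ([], [], [])
  let b := PySem.List.sorted cats.1 (fun x => PySem.List.len x.2) true
  let t := PySem.List.sorted cats.2.1 (fun x => PySem.List.len x.2) true
  let s := PySem.List.sorted cats.2.2 (fun x => PySem.List.len x.2) true
  (b ++ t ++ s, [("bottoms", b), ("tops", t), ("shoes", s)])

-- ===== PORT B =====
def pvRank : PySem.Dict String Int := PySem.Dict.ofList [("bottoms", 0), ("tops", 1), ("shoes", 2)]

def sort_items_by_category_alt (clothing_index : List (String × List String)) : (List (String × List String)) × (List (String × List (String × List String))) :=
  let sorted_items := PySem.List.sorted2 clothing_index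
    (fun kv => pvRank.getD (categorize_clothing_item kv.1) 0)  -- key always present: categorize returns a rank key
    (fun kv => -(PySem.List.len kv.2))
  let categorized_items := ["bottoms", "tops", "shoes"].map
    (fun cat => (cat, sorted_items.filter (fun kv => categorize_clothing_item kv.1 == cat)))
  (sorted_items, categorized_items)

-- ===== PRECONDITION & SPEC =====
-- Pre_ excludes association lists with duplicate keys, which cannot arise from A's Python dict argument.
def Pre_sort_items_by_category (clothing_index : List (String × List String)) : Prop :=
  (clothing_index.map Prod.fst).Nodup
instance (clothing_index : List (String × List String)) : Decidable (Pre_sort_items_by_category clothing_index) := by unfold Pre_sort_items_by_category; infer_instance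
def pvWitness_sort_items_by_category : (List (String × List String)) :=
  [("Jean x", ["p1"]), ("Polo", []), ("Sandal", ["p1", "p2"])]

def Spec_sort_items_by_category (clothing_index : List (String × List String)) (out : (List (String × List String)) × (List (String × List (String × List String)))) : Prop := out = sort_items_by_category_alt clothing_index
instance (clothing_index : List (String × List String)) (out : (List (String × List String)) × (List (String × List (String × List String)))) : Decidable (Spec_sort_items_by_category clothing_index out) := by unfold Spec_sort_items_by_category; infer_instance

-- ===== CLAIM (what is proved, stated in full; the proofs are below) =====
def Claim_equal_sort_items_by_category : Prop := ∀ (clothing_index : List (String × List String)), Dom_sort_items_by_category clothing_index → Pre_sort_items_by_category clothing_index → Spec_sort_items_by_category clothing_index (sort_items_by_category clothing_index)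

-- ===== LEMMAS AND PROOFS =====

abbrev PVItem := String × List String

-- proof-only abbreviations for the two sort orders
def pvK (kv : PVItem) : Int := -(PySem.List.len kv.2)
def pvR (kv : PVItem) : Int := pvRank.getD (categorize_clothing_item kv.1) 0
def pvBk (a b : PVItem) : Bool := decide (pvK a < pvK b)
def pvLt (a b : PVItem) : Bool := decide (pvR a < pvR b) || (!decide (pvR b < pvR a) && decide (pvK a < pvK b))
def pvS (ys : List PVItem) : List PVItem := List.foldl (fun acc x => PySem.List.insertBy pvBk x acc) [] ys
def pvIs (c : String) (kv : PVItem) : Bool := categorize_clothing_item kv.1 == c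

theorem pvCat_cases (s : String) : categorize_clothing_item s = "bottoms" ∨ categorize_clothing_item s = "tops" ∨ categorize_clothing_item s = "shoes" := by
  unfold categorize_clothing_item
  dsimp only
  split_ifs <;> simp

theorem insertBy_congr {α : Type} (bf bf' : α → α → Bool) (x : α) (ys : List α)
    (h : ∀ y ∈ ys, bf x y = bf' x y) :
    PySem.List.insertBy bf x ys = PySem.List.insertBy bf' x ys := by
  induction ys with
  | nil => rfl
  | cons y ys ih =>
    have hy := h y (by simp)
    simp only [PySem.List.insertBy, hy]
    split_ifs with hb
    · rfl
    · simpa using ih (fun z hz => h z (by simp [hz]))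

theorem insertBy_append_pos {α : Type} (bf : α → α → Bool) (x : α) (ys zs : List α)
    (h : ∀ y ∈ zs, bf x y = true) :
    PySem.List.insertBy bf x (ys ++ zs) = PySem.List.insertBy bf x ys ++ zs := by
  induction ys with
  | nil =>
    cases zs with
    | nil => rfl
    | cons z zs => simp [PySem.List.insertBy, h z (by simp)]
  | cons y ys ih =>
    simp only [List.cons_append, PySem.List.insertBy]
    split_ifs with hb
    · rfl
    · simpa using ih

theorem insertBy_append_neg {α : Type} (bf : α → α → Bool) (x : α) (ys zs : List α)
    (h : ∀ y ∈ ys, bf x y = false) :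
    PySem.List.insertBy bf x (ys ++ zs) = ys ++ PySem.List.insertBy bf x zs := by
  induction ys with
  | nil => rfl
  | cons y ys ih =>
    simp only [List.cons_append, PySem.List.insertBy, h y (by simp)]
    simpa using ih (fun z hz => h z (by simp [hz]))

theorem pvS_eq_sorted (ys : List PVItem) : pvS ys = PySem.List.sorted ys pvK false :=
  (PySem.List.sorted_eq_foldl_insertBy ys pvK).symm

theorem mem_pvS {y : PVItem} {ys : List PVItem} : y ∈ pvS ys ↔ y ∈ ys := by
  rw [pvS_eq_sorted]; exact PySem.List.mem_sorted ys pvK false y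

theorem pvS_append_singleton (ys : List PVItem) (x : PVItem) :
    pvS (ys ++ [x]) = PySem.List.insertBy pvBk x (pvS ys) := by
  simp [pvS, List.foldl_append]

theorem cat_of_mem_pvS_filter {c : String} {y : PVItem} {xs : List PVItem}
    (hy : y ∈ pvS (xs.filter (pvIs c))) : categorize_clothing_item y.1 = c := by
  rw [mem_pvS] at hy
  have h := (List.mem_filter.mp hy).2
  simpa [pvIs] using h

theorem pvRank_bottoms : pvRank.getD "bottoms" 0 = 0 := by decide
theorem pvRank_tops : pvRank.getD "tops" 0 = 1 := by decide
theorem pvRank_shoes : pvRank.getD "shoes" 0 = 2 := by decide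

theorem pvR_eq {y : PVItem} {c : String} (h : categorize_clothing_item y.1 = c) :
    pvR y = pvRank.getD c 0 := by simp [pvR, h]

theorem pvMain (xs : List PVItem) :
    List.foldl (fun acc x => PySem.List.insertBy pvLt x acc) [] xs =
      pvS (xs.filter (pvIs "bottoms")) ++ pvS (xs.filter (pvIs "tops")) ++ pvS (xs.filter (pvIs "shoes")) := by
  induction xs using List.reverseRecOn with
  | nil => rfl
  | append_singleton xs x ih =>
    rw [List.foldl_append, ih]
    simp only [List.foldl_cons, List.foldl_nil]
    rcases pvCat_cases x.1 with hc | hc | hc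
    · -- x is a bottom: r x = 0; everything in tops/shoes buckets is strictly after
      have hrx : pvR x = 0 := by rw [pvR_eq hc]; decide
      rw [List.append_assoc, insertBy_append_pos pvLt x _ _ (by
        intro y hy
        rcases List.mem_append.mp hy with hy | hy
        · have := pvR_eq (cat_of_mem_pvS_filter hy); simp [pvLt, hrx, this, pvRank_tops]
        · have := pvR_eq (cat_of_mem_pvS_filter hy); simp [pvLt, hrx, this, pvRank_shoes])]
      rw [insertBy_congr pvLt pvBk x _ (by
        intro y hy
        have := pvR_eq (cat_of_mem_pvS_filter hy)
        simp [pvLt, pvBk, hrx, this, pvRank_bottoms])]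
      rw [← pvS_append_singleton]
      simp [List.filter_append, pvIs, hc, List.append_assoc]
    · -- x is a top: r x = 1
      have hrx : pvR x = 1 := by rw [pvR_eq hc]; decide
      rw [List.append_assoc, insertBy_append_neg pvLt x _ _ (by
        intro y hy
        have := pvR_eq (cat_of_mem_pvS_filter hy); simp [pvLt, hrx, this, pvRank_bottoms])]
      rw [insertBy_append_pos pvLt x _ _ (by
        intro y hy
        have := pvR_eq (cat_of_mem_pvS_filter hy); simp [pvLt, hrx, this, pvRank_shoes])]
      rw [insertBy_congr pvLt pvBk x _ (by
        intro y hy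
        have := pvR_eq (cat_of_mem_pvS_filter hy)
        simp [pvLt, pvBk, hrx, this, pvRank_tops])]
      rw [← pvS_append_singleton]
      simp [List.filter_append, pvIs, hc, List.append_assoc]
    · -- x is a shoe: r x = 2
      have hrx : pvR x = 2 := by rw [pvR_eq hc]; decide
      rw [insertBy_append_neg pvLt x _ _ (by
        intro y hy
        rcases List.mem_append.mp hy with hy | hy
        · have := pvR_eq (cat_of_mem_pvS_filter hy); simp [pvLt, hrx, this, pvRank_bottoms]
        · have := pvR_eq (cat_of_mem_pvS_filter hy); simp [pvLt, hrx, this, pvRank_tops])]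
      rw [insertBy_congr pvLt pvBk x _ (by
        intro y hy
        have := pvR_eq (cat_of_mem_pvS_filter hy)
        simp [pvLt, pvBk, hrx, this, pvRank_shoes])]
      rw [← pvS_append_singleton]
      simp [List.filter_append, pvIs, hc]

theorem pvBuckets (xs : List PVItem) :
    xs.foldl
      (fun (acc : List PVItem × List PVItem × List PVItem) kv =>
        let category := categorize_clothing_item kv.1
        if category == "bottoms" then (acc.1 ++ [kv], acc.2.1, acc.2.2)
        else if category == "tops" then (acc.1, acc.2.1 ++ [kv], acc.2.2)
        else (acc.1, acc.2.1, acc.2.2 ++ [kv]))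
      ([], [], []) =
      (xs.filter (pvIs "bottoms"), xs.filter (pvIs "tops"), xs.filter (pvIs "shoes")) := by
  induction xs using List.reverseRecOn with
  | nil => rfl
  | append_singleton xs x ih =>
    rw [List.foldl_append, ih]
    simp only [List.foldl_cons, List.foldl_nil]
    rcases pvCat_cases x.1 with hc | hc | hc <;>
      simp [hc, List.filter_append, pvIs]

theorem pvSortedRev_eq_pvS (v : List PVItem) :
    PySem.List.sorted v (fun x => PySem.List.len x.2) true = pvS v := by
  rw [PySem.List.sorted_rev_eq_foldl_insertBy]
  unfold pvS
  have hpred : (fun (a b : PVItem) => decide (PySem.List.len b.2 < PySem.List.len a.2)) = pvBk := by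
    funext a b
    simp [pvBk, pvK]
  rw [hpred]

theorem pvFilter_concat_eq {c : String} (xs : List PVItem) (hc : c = "bottoms" ∨ c = "tops" ∨ c = "shoes") :
    (pvS (xs.filter (pvIs "bottoms")) ++ pvS (xs.filter (pvIs "tops")) ++ pvS (xs.filter (pvIs "shoes"))).filter (pvIs c) =
      pvS (xs.filter (pvIs c)) := by
  have hself : ∀ c' : String, (pvS (xs.filter (pvIs c'))).filter (pvIs c') = pvS (xs.filter (pvIs c')) := by
    intro c'
    exact List.filter_eq_self.mpr (fun y hy => by simp [pvIs, cat_of_mem_pvS_filter hy])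
  have hnil : ∀ c' c'' : String, c'' ≠ c' → (pvS (xs.filter (pvIs c''))).filter (pvIs c') = [] := by
    intro c' c'' hne
    exact List.filter_eq_nil_iff.mpr (fun y hy => by simp [pvIs, cat_of_mem_pvS_filter hy, hne])
  rcases hc with h | h | h <;>
    subst h <;>
    simp [List.filter_append, hself, hnil, String.ne_of_lt]

theorem sort_items_by_category_agree (clothing_index : List (String × List String)) :
    sort_items_by_category clothing_index = sort_items_by_category_alt clothing_index := by
  unfold sort_items_by_category sort_items_by_category_alt
  rw [pvBuckets]
  have hmain : PySem.List.sorted2 clothing_index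
      (fun kv => pvRank.getD (categorize_clothing_item kv.1) 0)
      (fun kv => -(PySem.List.len kv.2)) false =
      pvS (clothing_index.filter (pvIs "bottoms")) ++ pvS (clothing_index.filter (pvIs "tops")) ++
        pvS (clothing_index.filter (pvIs "shoes")) := by
    rw [show PySem.List.sorted2 clothing_index
        (fun kv => pvRank.getD (categorize_clothing_item kv.1) 0)
        (fun kv => -(PySem.List.len kv.2)) false =
        List.foldl (fun acc x => PySem.List.insertBy pvLt x acc) [] clothing_index from rfl]
    exact pvMain clothing_index
  simp only [pvSortedRev_eq_pvS, hmain]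
  refine Prod.ext rfl ?_
  simp only [List.map,
    show (fun kv : PVItem => categorize_clothing_item kv.1 == "bottoms") = pvIs "bottoms" from rfl,
    show (fun kv : PVItem => categorize_clothing_item kv.1 == "tops") = pvIs "tops" from rfl,
    show (fun kv : PVItem => categorize_clothing_item kv.1 == "shoes") = pvIs "shoes" from rfl]
  rw [pvFilter_concat_eq _ (Or.inl rfl), pvFilter_concat_eq _ (Or.inr (Or.inl rfl)),
    pvFilter_concat_eq _ (Or.inr (Or.inr rfl))]

-- ===== VERDICT (by name: the statement is the Claim_ definition above) =====
theorem sort_items_by_category_spec : Claim_equal_sort_items_by_category := by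
  intro ci _ _
  unfold Spec_sort_items_by_category
  exact sort_items_by_category_agree ci
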